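-- pv_equiv track=rewrite | github.com/Shubhf/companion-mem-sys | chat_system/response_planner.py | _is_greeting_or_smalltalk
-- ===== SOURCE A (Python) =====
-- def _is_greeting_or_smalltalk(message: str) -> bool:
--     """Check if the message is a greeting or small talk, not a memory query."""
--     msg_lower = message.lower().strip().rstrip("?!. ")
--     greetings = [
--         "hi", "hello", "hey", "howdy", "sup", "yo", "hola",
--         "good morning", "good afternoon", "good evening", "good night",
--         "how are you", "how are u", "how r u", "how's it going",
--         "what's up", "whats up", "wassup", "how do you do",
--         "how have you been", "how you doing", "how are things",
--         "nice to meet you", "thanks", "thank you", "bye", "goodbye",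
--         "see you", "take care", "kaise ho", "kya haal hai",
--         "namaste", "salam", "ok", "okay", "sure", "yes", "no",
--         "hii", "hiii", "hiiii", "heyy", "heyyy",
--         "hi how are u", "hi how are you", "hello how are you",
--         "hey how are you", "hi there", "hello there",
--     ]
--     return any(msg_lower == g or msg_lower.startswith(g + " ") or msg_lower.startswith(g + ",") for g in greetings)
-- ===== SOURCE B (Python) =====
-- _GREETING_SET = frozenset((
--     "hi;hello;hey;howdy;sup;yo;hola;"
--     "good morning;good afternoon;good evening;good night;"
--     "how are you;how are u;how r u;how's it going;"
--     "what's up;whats up;wassup;how do you do;"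
--     "how have you been;how you doing;how are things;"
--     "nice to meet you;thanks;thank you;bye;goodbye;"
--     "see you;take care;kaise ho;kya haal hai;"
--     "namaste;salam;ok;okay;sure;yes;no;"
--     "hii;hiii;hiiii;heyy;heyyy;"
--     "hi how are u;hi how are you;hello how are you;"
--     "hey how are you;hi there;hello there"
-- ).split(";"))
--
--
-- def _is_greeting_or_smalltalk(message: str) -> bool:
--     msg_lower = message.lower().strip().rstrip("?!. ")
--     prefix = ""
--     for ch in msg_lower:
--         if (ch == " " or ch == ",") and prefix in _GREETING_SET:
--             return True
--         prefix += ch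
--     return prefix in _GREETING_SET
-- ===== Notes on version B (the rewrite author's own statement) =====
-- stated objective: alternative
-- what changed: B replaces A's scan over the greeting list (equality plus two startswith tests per greeting) by a single left-to-right pass over the message that accumulates a prefix and tests it for frozenset membership at each space/comma separator and at the end of the string.
import Mathlib
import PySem

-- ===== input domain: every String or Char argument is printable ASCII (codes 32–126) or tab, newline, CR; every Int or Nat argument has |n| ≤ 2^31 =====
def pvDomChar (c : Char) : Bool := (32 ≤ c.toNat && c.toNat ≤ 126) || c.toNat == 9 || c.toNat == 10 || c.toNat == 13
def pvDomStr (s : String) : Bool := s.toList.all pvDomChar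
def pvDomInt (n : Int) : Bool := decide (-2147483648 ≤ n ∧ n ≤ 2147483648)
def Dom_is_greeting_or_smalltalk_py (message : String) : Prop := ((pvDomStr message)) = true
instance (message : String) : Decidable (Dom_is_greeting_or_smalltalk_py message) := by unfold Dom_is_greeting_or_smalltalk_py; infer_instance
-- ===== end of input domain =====

-- B replaces A's scan over the greeting list (equality + two startswith per greeting) by a single
-- left-to-right pass over the message accumulating a prefix and testing it against a frozenset
-- at each space/comma boundary and at the end (objective: alternative decomposition).

-- ===== PORT A =====
-- rstrip("?!. ") is ported by hand (PySem has no rstrip-with-chars): drop trailing chars of "?!. " — exact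
def pvMsgLower (message : String) : List Char :=
  ((PySem.Chars.strip (PySem.Chars.lower message.toList)).reverse.dropWhile
    (fun c => ("?!. ".toList).contains c)).reverse

def pvGreetings : List (List Char) := [
  "hi".toList, "hello".toList, "hey".toList, "howdy".toList, "sup".toList, "yo".toList, "hola".toList,
  "good morning".toList, "good afternoon".toList, "good evening".toList, "good night".toList,
  "how are you".toList, "how are u".toList, "how r u".toList, "how's it going".toList,
  "what's up".toList, "whats up".toList, "wassup".toList, "how do you do".toList,
  "how have you been".toList, "how you doing".toList, "how are things".toList,
  "nice to meet you".toList, "thanks".toList, "thank you".toList, "bye".toList, "goodbye".toList,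
  "see you".toList, "take care".toList, "kaise ho".toList, "kya haal hai".toList,
  "namaste".toList, "salam".toList, "ok".toList, "okay".toList, "sure".toList, "yes".toList, "no".toList,
  "hii".toList, "hiii".toList, "hiiii".toList, "heyy".toList, "heyyy".toList,
  "hi how are u".toList, "hi how are you".toList, "hello how are you".toList,
  "hey how are you".toList, "hi there".toList, "hello there".toList]

def is_greeting_or_smalltalk_py (message : String) : Bool :=
  let msg_lower := pvMsgLower message
  pvGreetings.any (fun g =>
    msg_lower == g || PySem.Chars.startswith msg_lower (g ++ [' '])
      || PySem.Chars.startswith msg_lower (g ++ [',']))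

-- ===== PORT B =====
-- the frozenset built from one semicolon-joined literal, exactly as in Source B
def pvGreetingSetB : PySem.Set (List Char) :=
  PySem.Set.ofList (PySem.Chars.splitOn
    ("hi;hello;hey;howdy;sup;yo;hola;good morning;good afternoon;good evening;good night;how are you;how are u;how r u;how's it going;what's up;whats up;wassup;how do you do;how have you been;how you doing;how are things;nice to meet you;thanks;thank you;bye;goodbye;see you;take care;kaise ho;kya haal hai;namaste;salam;ok;okay;sure;yes;no;hii;hiii;hiiii;heyy;heyyy;hi how are u;hi how are you;hello how are you;hey how are you;hi there;hello there").toList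
    (";".toList))

-- the accumulator loop of Source B: walk the chars, testing the accumulated prefix at each separator
def pvScanB : List Char → List Char → Bool
  | [], pre => PySem.Set.contains pvGreetingSetB pre
  | ch :: rest, pre =>
      if (ch == ' ' || ch == ',') && PySem.Set.contains pvGreetingSetB pre then true
      else pvScanB rest (pre ++ [ch])

-- shared preprocessing line of Source B: message.lower().strip().rstrip("?!. ") (hand port, as in A)
def pvMsgLowerB (message : String) : List Char :=
  ((PySem.Chars.strip (PySem.Chars.lower message.toList)).reverse.dropWhile
    (fun c => ("?!. ".toList).contains c)).reverse

def is_greeting_or_smalltalk_py_alt (message : String) : Bool :=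
  pvScanB (pvMsgLowerB message) []

-- ===== PRECONDITION & SPEC =====
def Spec_is_greeting_or_smalltalk_py (message : String) (out : Bool) : Prop := out = is_greeting_or_smalltalk_py_alt message
instance (message : String) (out : Bool) : Decidable (Spec_is_greeting_or_smalltalk_py message out) := by unfold Spec_is_greeting_or_smalltalk_py; infer_instance

-- ===== CLAIM (what is proved, stated in full; the proofs are below) =====
def Claim_equal_is_greeting_or_smalltalk_py : Prop := ∀ (message : String), Dom_is_greeting_or_smalltalk_py message → Spec_is_greeting_or_smalltalk_py message (is_greeting_or_smalltalk_py message)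

-- ===== LEMMAS AND PROOFS =====
set_option maxRecDepth 8192

-- B's split literal yields exactly A's greeting list
theorem pv_split_eq :
    PySem.Chars.splitOn
      ("hi;hello;hey;howdy;sup;yo;hola;good morning;good afternoon;good evening;good night;how are you;how are u;how r u;how's it going;what's up;whats up;wassup;how do you do;how have you been;how you doing;how are things;nice to meet you;thanks;thank you;bye;goodbye;see you;take care;kaise ho;kya haal hai;namaste;salam;ok;okay;sure;yes;no;hii;hiii;hiiii;heyy;heyyy;hi how are u;hi how are you;hello how are you;hey how are you;hi there;hello there").toList
      (";".toList) = pvGreetings := by decide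

theorem pv_mem_setB (x : List Char) : x ∈ pvGreetingSetB ↔ x ∈ pvGreetings := by
  unfold pvGreetingSetB
  rw [pv_split_eq]
  simp [PySem.Set.mem_ofList]

theorem pv_contains_setB (x : List Char) :
    PySem.Set.contains pvGreetingSetB x = true ↔ x ∈ pvGreetings := by
  simp [PySem.Set.contains, pv_mem_setB]

-- the accumulator loop returns true iff the full string or some prefix cut at a separator is a greeting
theorem pv_scan_iff (rest pre : List Char) :
    pvScanB rest pre = true ↔
      (pre ++ rest ∈ pvGreetings ∨
        ∃ u c v, rest = u ++ c :: v ∧ (c = ' ' ∨ c = ',') ∧ pre ++ u ∈ pvGreetings) := by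
  induction rest generalizing pre with
  | nil =>
    simp [pvScanB, pv_mem_setB]
  | cons ch rest ih =>
    rw [pvScanB]
    split_ifs with h
    · simp only [Bool.and_eq_true, Bool.or_eq_true, beq_iff_eq] at h
      obtain ⟨hc, hpre⟩ := h
      constructor
      · intro _
        exact Or.inr ⟨[], ch, rest, rfl, by tauto, by simpa using (pv_contains_setB pre).mp hpre⟩
      · intro _; rfl
    · rw [ih]
      simp only [Bool.and_eq_true, Bool.or_eq_true, beq_iff_eq, not_and_or, not_or] at h
      constructor
      · rintro (hmem | ⟨u, c, v, hrest, hc, hu⟩)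
        · exact Or.inl (by simpa using hmem)
        · exact Or.inr ⟨ch :: u, c, v, by simp [hrest], hc, by simpa using hu⟩
      · rintro (hmem | ⟨u, c, v, hrest, hc, hu⟩)
        · exact Or.inl (by simpa using hmem)
        · cases u with
          | nil =>
            simp only [List.nil_append, List.cons.injEq] at hrest
            obtain ⟨rfl, rfl⟩ := hrest
            rcases h with h | h
            · rcases hc with rfl | rfl <;> simp at h
            · exact absurd ((pv_contains_setB pre).mpr (by simpa using hu)) (by simpa using h)
          | cons a u' =>
            simp only [List.cons_append, List.cons.injEq] at hrest
            obtain ⟨rfl, rfl⟩ := hrest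
            exact Or.inr ⟨u', c, v, rfl, hc, by simpa using hu⟩

-- A's per-greeting test in existential form
theorem pv_A_iff (m : List Char) :
    (pvGreetings.any (fun g =>
        m == g || PySem.Chars.startswith m (g ++ [' '])
          || PySem.Chars.startswith m (g ++ [',']))) = true ↔
      (m ∈ pvGreetings ∨
        ∃ u c v, m = u ++ c :: v ∧ (c = ' ' ∨ c = ',') ∧ u ∈ pvGreetings) := by
  simp only [List.any_eq_true, Bool.or_eq_true, beq_iff_eq, PySem.Chars.startswith_iff]
  constructor
  · rintro ⟨g, hg, (rfl | ⟨t, ht⟩) | ⟨t, ht⟩⟩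
    · exact Or.inl hg
    · exact Or.inr ⟨g, ' ', t, by rw [← ht]; simp, Or.inl rfl, hg⟩
    · exact Or.inr ⟨g, ',', t, by rw [← ht]; simp, Or.inr rfl, hg⟩
  · rintro (hm | ⟨u, c, v, rfl, hc, hu⟩)
    · exact ⟨m, hm, Or.inl (Or.inl rfl)⟩
    · refine ⟨u, hu, ?_⟩
      rcases hc with rfl | rfl
      · exact Or.inl (Or.inr ⟨v, by simp⟩)
      · exact Or.inr ⟨v, by simp⟩

-- ===== VERDICT (by name: the statement is the Claim_ definition above) =====
theorem is_greeting_or_smalltalk_py_spec : Claim_equal_is_greeting_or_smalltalk_py := by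
  intro message _
  unfold Spec_is_greeting_or_smalltalk_py is_greeting_or_smalltalk_py is_greeting_or_smalltalk_py_alt
  have hmsg : pvMsgLowerB message = pvMsgLower message := rfl
  rw [hmsg]
  rw [Bool.eq_iff_iff, pv_A_iff (pvMsgLower message), pv_scan_iff (pvMsgLower message) []]
  simp
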